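-- pv_equiv track=rewrite | github.com/Magic-Helper/magic_helper_vk_bot | app/services/storage/report_controller.py | _calculate_unique_steamid
-- ===== SOURCE A (Python) =====
-- def _calculate_unique_steamid(reports: list[int]) -> dict[int, int]:
--     steamid_reports_count = {}
--     for steamid in reports:
--         if steamid not in steamid_reports_count:
--             steamid_reports_count[steamid] = 1
--         else:
--             steamid_reports_count[steamid] += 1
--     return steamid_reports_count
-- ===== SOURCE B (Python) =====
-- def _calculate_unique_steamid(reports: list[int]) -> dict[int, int]:
--     return {steamid: reports.count(steamid) for steamid in dict.fromkeys(reports)}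
-- ===== Notes on version B (the rewrite author's own statement) =====
-- stated objective: idiomatic
-- what changed: Replaces the incremental dict-counting loop with a one-line comprehension over first occurrences (dict.fromkeys) that counts each distinct id with list.count.
import Mathlib
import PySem

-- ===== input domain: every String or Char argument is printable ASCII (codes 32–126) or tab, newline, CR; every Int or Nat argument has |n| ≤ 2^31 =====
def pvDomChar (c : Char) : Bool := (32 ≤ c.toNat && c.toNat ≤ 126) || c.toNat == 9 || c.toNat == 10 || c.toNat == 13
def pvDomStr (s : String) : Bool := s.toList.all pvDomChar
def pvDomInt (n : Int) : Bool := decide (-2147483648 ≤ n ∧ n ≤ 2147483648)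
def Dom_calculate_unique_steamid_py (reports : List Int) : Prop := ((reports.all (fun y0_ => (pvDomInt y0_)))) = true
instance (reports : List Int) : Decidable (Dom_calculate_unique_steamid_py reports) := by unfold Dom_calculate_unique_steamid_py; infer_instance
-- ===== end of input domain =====

-- B replaces A's incremental dict-counting loop with an idiomatic comprehension: dedupe to first occurrences, then count each distinct id (same result, not faster).


-- ===== PORT A =====
-- Build a dict, incrementing per element (A's loop, branch order preserved); return its items.
def calculate_unique_steamid_py (reports : List Int) : List (Int × Int) :=
  (reports.foldl
    (fun d steamid =>
      if ¬ d.contains steamid then d.insert steamid 1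
      else d.insert steamid (d.getD steamid 0 + 1))
    (PySem.Dict.empty : PySem.Dict Int Int)).items

-- ===== PORT B =====
-- dict comprehension: first occurrences in order, each paired with its count in reports.
def calculate_unique_steamid_py_alt (reports : List Int) : List (Int × Int) :=
  (PySem.List.dedup reports).map (fun steamid => (steamid, (reports.count steamid : Int)))

-- ===== PRECONDITION & SPEC =====
def Spec_calculate_unique_steamid_py (reports : List Int) (out : List (Int × Int)) : Prop := out = calculate_unique_steamid_py_alt reports
instance (reports : List Int) (out : List (Int × Int)) : Decidable (Spec_calculate_unique_steamid_py reports out) := by unfold Spec_calculate_unique_steamid_py; infer_instance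

-- ===== CLAIM (what is proved, stated in full; the proofs are below) =====
def Claim_equal_calculate_unique_steamid_py : Prop := ∀ (reports : List Int), Dom_calculate_unique_steamid_py reports → Spec_calculate_unique_steamid_py reports (calculate_unique_steamid_py reports)

-- ===== LEMMAS AND PROOFS =====

-- A's loop body equals the Counter step collections.Counter uses.
lemma step_eq_counter_step (d : PySem.Dict Int Int) (s : Int) :
    (if ¬ d.contains s then d.insert s 1 else d.insert s (d.getD s 0 + 1))
      = d.modify s 0 (· + 1) := by
  by_cases h : d.contains s = true
  · simp [h, PySem.Dict.modify]
  · have hf : d.contains s = false := by simpa using h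
    simp [h, PySem.Dict.modify, PySem.Dict.getD_of_not_contains (h := hf)]

-- ===== VERDICT (by name: the statement is the Claim_ definition above) =====
theorem calculate_unique_steamid_py_spec : Claim_equal_calculate_unique_steamid_py := by
  intro reports _
  unfold Spec_calculate_unique_steamid_py calculate_unique_steamid_py calculate_unique_steamid_py_alt
  have h : reports.foldl
      (fun d steamid =>
        if ¬ d.contains steamid then d.insert steamid 1
        else d.insert steamid (d.getD steamid 0 + 1))
      (PySem.Dict.empty : PySem.Dict Int Int) = PySem.Dict.counter reports := by
    rw [PySem.Dict.counter_eq_foldl]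
    apply PySem.List.foldl_congr_mem
    intro acc x _
    exact step_eq_counter_step acc x
  rw [h, PySem.Dict.items_counter, PySem.List.dedup_eq_ofList]
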